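-- pv_equiv track=rewrite | github.com/MMoMM-org/miyo-tomo | tomo/scripts/yaml-fixer.py | fix_tabs
-- ===== SOURCE A (Python) =====
-- def fix_tabs(lines: list[str]) -> list[str]:
--     """Replace leading tabs with 2 spaces each."""
--     result = []
--     for line in lines:
--         stripped = line.lstrip('\t')
--         n_tabs = len(line) - len(stripped)
--         if n_tabs:
--             line = ('  ' * n_tabs) + stripped
--         result.append(line)
--     return result
-- ===== SOURCE B (Python) =====
-- def fix_tabs(lines: list[str]) -> list[str]:
--     """Replace leading tabs with 2 spaces each."""
--     return [_untab(line) for line in lines]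
--
--
-- def _untab(line: str) -> str:
--     if line.startswith('\t'):
--         return '  ' + _untab(line[1:])
--     return line
-- ===== Notes on version B (the rewrite author's own statement) =====
-- stated objective: alternative
-- what changed: Replaces A's measure-slice-rebuild loop (lstrip, length difference, string multiplication, accumulator append) with a per-line recursion that peels one leading tab at a time, emitting two spaces per step, collected by a comprehension.
import Mathlib
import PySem

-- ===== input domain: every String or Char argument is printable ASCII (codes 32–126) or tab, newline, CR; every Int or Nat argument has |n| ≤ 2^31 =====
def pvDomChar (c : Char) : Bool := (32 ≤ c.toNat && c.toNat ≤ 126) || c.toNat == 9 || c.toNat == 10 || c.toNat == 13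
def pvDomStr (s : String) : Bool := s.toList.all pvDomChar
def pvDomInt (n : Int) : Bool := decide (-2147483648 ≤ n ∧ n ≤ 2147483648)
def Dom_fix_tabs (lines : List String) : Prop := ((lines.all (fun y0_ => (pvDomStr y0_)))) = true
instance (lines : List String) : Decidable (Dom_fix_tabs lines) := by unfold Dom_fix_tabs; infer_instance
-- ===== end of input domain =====

-- B replaces A's measure-slice-rebuild loop with a per-line recursion peeling one leading tab at a time (alternative decomposition, same cost).

-- ===== PORT A =====
-- line.lstrip('\t') is exactly dropWhile (· == '\t') on the characters (ported by hand; exact)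
def pvFixLineA (line : String) : String :=
  let stripped := line.toList.dropWhile (fun c => c == '\t')
  let n_tabs := line.toList.length - stripped.length
  if n_tabs ≠ 0 then String.ofList ((List.replicate n_tabs "  ".toList).flatten ++ stripped) else line

def fix_tabs (lines : List String) : List String :=
  lines.foldl (fun result line => result ++ [pvFixLineA line]) []

-- ===== PORT B =====
def pvUntab : List Char → List Char
  | [] => []
  | c :: rest => if c == '\t' then ' ' :: ' ' :: pvUntab rest else c :: rest

def fix_tabs_alt (lines : List String) : List String :=
  lines.map (fun line => String.ofList (pvUntab line.toList))

-- ===== PRECONDITION & SPEC =====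
def Spec_fix_tabs (lines : List String) (out : List String) : Prop := out = fix_tabs_alt lines
instance (lines : List String) (out : List String) : Decidable (Spec_fix_tabs lines out) := by unfold Spec_fix_tabs; infer_instance

-- ===== CLAIM (what is proved, stated in full; the proofs are below) =====
def Claim_equal_fix_tabs : Prop := ∀ (lines : List String), Dom_fix_tabs lines → Spec_fix_tabs lines (fix_tabs lines)

-- ===== LEMMAS AND PROOFS =====
theorem pvUntab_eq (cs : List Char) :
    pvUntab cs =
      (List.replicate (cs.length - (cs.dropWhile (fun c => c == '\t')).length) "  ".toList).flatten
        ++ cs.dropWhile (fun c => c == '\t') := by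
  induction cs with
  | nil => simp [pvUntab]
  | cons c rest ih =>
    by_cases h : c = '\t'
    · subst h
      have hlen : (rest.dropWhile (fun c => c == '\t')).length ≤ rest.length :=
        List.length_dropWhile_le _ _
      simp only [pvUntab, List.dropWhile_cons, beq_self_eq_true, if_true,
        List.length_cons]
      have : rest.length + 1 - (rest.dropWhile (fun c => c == '\t')).length =
          (rest.length - (rest.dropWhile (fun c => c == '\t')).length) + 1 := by omega
      rw [this, List.replicate_succ, List.flatten_cons, ih]
      rfl
    · have hb : (c == '\t') = false := by simp [h]
      simp [pvUntab, hb]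

theorem pvFixLineA_eq (line : String) : pvFixLineA line = String.ofList (pvUntab line.toList) := by
  unfold pvFixLineA
  rw [pvUntab_eq]
  set cs := line.toList with hcs
  by_cases h : cs.length - (cs.dropWhile (fun c => c == '\t')).length = 0
  · have hdw : cs.dropWhile (fun c => c == '\t') = cs := by
      have := List.length_dropWhile_le (fun c => c == '\t') cs
      exact List.IsSuffix.eq_of_length (List.dropWhile_suffix _) (by omega)
    rw [if_neg (fun hne => hne h), hdw]
    simp only [hcs, Nat.sub_self, List.replicate_zero, List.flatten_nil, List.nil_append]
    exact String.ofList_toList.symm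
  · simp only [if_pos h]

-- ===== VERDICT (by name: the statement is the Claim_ definition above) =====
theorem fix_tabs_spec : Claim_equal_fix_tabs := by
  intro lines _
  unfold Spec_fix_tabs fix_tabs fix_tabs_alt
  rw [PySem.List.foldl_append_singleton_eq_map]
  exact List.map_congr_left (fun l _ => pvFixLineA_eq l)
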